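-- pv_equiv track=rewrite | github.com/miliar/Code_Jam_Webscraper | solutions_python/solutions_year14_round0_nr4/1415.py | playUnfaith
-- ===== SOURCE A (Python) =====
-- def playUnfaith(NaomiBlocks, KenBlocks):
--   NaomiBlocks.sort()
--   NaomiBlocks.reverse()
--   KenBlocks.sort()
--
--  # while NaomiBlocks:
--   counter = 0
--     #plays every loser blocks
--   while NaomiBlocks:
--     minNao = min(NaomiBlocks)
--     minKen = min(KenBlocks)
--     if (minKen > minNao):
--       minKen = max(KenBlocks)
--     else:
--       counter += 1
--
--     NaomiBlocks.remove(minNao)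
--     KenBlocks.remove(minKen)
--
--   return counter
-- ===== SOURCE B (Python) =====
-- def playUnfaith(NaomiBlocks, KenBlocks):
--     # Two-pointer pass: note the return value only; unlike A, B does not mutate its arguments.
--     n = sorted(NaomiBlocks)
--     k = sorted(KenBlocks)
--     j = 0
--     counter = 0
--     for x in n:
--         if j < len(k) and k[j] <= x:
--             counter += 1
--             j += 1
--     return counter
-- ===== Notes on version B (the rewrite author's own statement) =====
-- stated objective: faster
-- what changed: Replaced the destructive loop that rescans the lists with min/max/remove each round by a single two-pointer pass over both sorted lists.
import Mathlib
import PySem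

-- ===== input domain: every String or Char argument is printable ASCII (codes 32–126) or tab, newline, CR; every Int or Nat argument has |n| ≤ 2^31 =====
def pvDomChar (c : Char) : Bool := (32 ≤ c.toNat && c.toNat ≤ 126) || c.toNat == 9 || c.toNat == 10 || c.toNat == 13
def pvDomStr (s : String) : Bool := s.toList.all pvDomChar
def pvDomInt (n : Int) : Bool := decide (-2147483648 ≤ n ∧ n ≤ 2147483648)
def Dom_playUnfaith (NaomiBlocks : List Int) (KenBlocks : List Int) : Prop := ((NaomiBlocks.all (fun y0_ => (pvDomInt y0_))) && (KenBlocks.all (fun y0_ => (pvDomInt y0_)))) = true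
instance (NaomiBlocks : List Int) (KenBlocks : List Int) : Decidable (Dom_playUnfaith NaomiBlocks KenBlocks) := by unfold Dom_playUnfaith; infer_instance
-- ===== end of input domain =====

-- B replaces A's destructive min/max/remove rounds by one two-pointer pass over both sorted
-- lists. Equivalence is about the RETURN value only: Python A sorts and empties its argument
-- lists in place, B does not mutate them.

-- ===== PORT A =====
-- the while loop: each round takes min(Naomi) and min(Ken) (or max(Ken)), removes both.
def playUnfaithLoop (nao ken : List Int) (counter : Int) : Int :=
  if hno : nao = [] then counter
  else
    match PySem.List.min? nao (fun y => y) with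
    | none => counter            -- unreachable: nao ≠ []
    | some minNao =>
      match PySem.List.min? ken (fun y => y) with
      | none => counter          -- Python: ValueError (min of empty Ken); excluded by Pre_
      | some minKen =>
        let p : Int × Int :=
          if minNao < minKen then ((PySem.List.max? ken (fun y => y)).getD 0, counter)
          else (minKen, counter + 1)
        match hr : PySem.List.remove? nao minNao, PySem.List.remove? ken p.1 with
        | some nao', some ken' => playUnfaithLoop nao' ken' p.2
        | _, _ => p.2            -- unreachable: both values are members
termination_by nao.length
decreasing_by
  have hmem : minNao ∈ nao := by
    by_contra h
    rw [(PySem.List.remove?_eq_none_iff _ _).mpr h] at hr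
    cases hr
  rw [PySem.List.remove?_eq_some_erase _ _ hmem] at hr
  injection hr with hr
  subst hr
  have : 0 < nao.length := List.length_pos_of_ne_nil hno
  simp [hmem]
  omega

def playUnfaith (NaomiBlocks : List Int) (KenBlocks : List Int) : Int :=
  playUnfaithLoop ((PySem.List.sorted NaomiBlocks (fun y => y) false).reverse)
    (PySem.List.sorted KenBlocks (fun y => y) false) 0

-- ===== PORT B =====
def playUnfaith_alt (NaomiBlocks : List Int) (KenBlocks : List Int) : Int :=
  let n := PySem.List.sorted NaomiBlocks (fun y => y) false
  let k := PySem.List.sorted KenBlocks (fun y => y) false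
  (n.foldl (fun (s : Nat × Int) x =>
      match k[s.1]? with          -- j < len(k) and k[j] <= x
      | some v => if v ≤ x then (s.1 + 1, s.2 + 1) else s
      | none => s) ((0 : Nat), (0 : Int))).2

-- ===== PRECONDITION & SPEC =====
-- Pre_ excludes exactly the inputs where A raises ValueError: fewer Ken blocks than Naomi blocks.
def Pre_playUnfaith (NaomiBlocks : List Int) (KenBlocks : List Int) : Prop :=
  NaomiBlocks.length ≤ KenBlocks.length
instance (NaomiBlocks : List Int) (KenBlocks : List Int) : Decidable (Pre_playUnfaith NaomiBlocks KenBlocks) := by unfold Pre_playUnfaith; infer_instance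

def pvWitness_playUnfaith : List Int × List Int := ([3, 1, 2], [2, 4, 1])

def Spec_playUnfaith (NaomiBlocks : List Int) (KenBlocks : List Int) (out : Int) : Prop := out = playUnfaith_alt NaomiBlocks KenBlocks
instance (NaomiBlocks : List Int) (KenBlocks : List Int) (out : Int) : Decidable (Spec_playUnfaith NaomiBlocks KenBlocks out) := by unfold Spec_playUnfaith; infer_instance

-- ===== CLAIM (what is proved, stated in full; the proofs are below) =====
def Claim_equal_playUnfaith : Prop := ∀ (NaomiBlocks : List Int) (KenBlocks : List Int), Dom_playUnfaith NaomiBlocks KenBlocks → Pre_playUnfaith NaomiBlocks KenBlocks → Spec_playUnfaith NaomiBlocks KenBlocks (playUnfaith NaomiBlocks KenBlocks)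

-- ===== LEMMAS AND PROOFS =====

-- B's fold, written as a recursion on the Naomi list with pointer j into the fixed list k.
def loopB (k : List Int) : List Int → Nat → Int → Int
  | [], _, c => c
  | x :: t, j, c =>
    match k[j]? with
    | some v => if v ≤ x then loopB k t (j + 1) (c + 1) else loopB k t j c
    | none => loopB k t j c

theorem foldB (k : List Int) : ∀ (n : List Int) (j : Nat) (c : Int),
    (n.foldl (fun (s : Nat × Int) x =>
      match k[s.1]? with
      | some v => if v ≤ x then (s.1 + 1, s.2 + 1) else s
      | none => s) (j, c)).2 = loopB k n j c := by
  intro n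
  induction n with
  | nil => intro j c; simp [loopB]
  | cons x t ih =>
    intro j c
    simp only [List.foldl_cons, loopB]
    cases hk : k[j]? with
    | none => exact ih j c
    | some v =>
      by_cases hv : v ≤ x
      · simp [hv, ih]
      · simp [hv, ih]

-- a nonempty constant-m list equals m :: its own dropLast
theorem const_cons_dropLast (m : Int) : ∀ (t : List Int), t ≠ [] → (∀ y ∈ t, y = m) →
    m :: t.dropLast = t := by
  intro t
  induction t with
  | nil => intro h; exact absurd rfl h
  | cons y t' ih =>
    intro _ hall
    cases t' with
    | nil => simp [hall y (by simp)]
    | cons z t'' =>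
      have hy : y = m := hall y (by simp)
      simp only [List.dropLast_cons₂]
      rw [hy]
      congr 1
      exact ih (by simp) (fun w hw => hall w (List.mem_cons_of_mem _ hw))

-- if every element equal to m comes at the end, removing m removes the last element
theorem remove_suffix (m : Int) : ∀ (l : List Int), m ∈ l →
    l.Pairwise (fun a b => a = m → b = m) →
    PySem.List.remove? l m = some l.dropLast := by
  intro l
  induction l with
  | nil => intro h; cases h
  | cons x t ih =>
    intro hm hp
    rw [List.pairwise_cons] at hp
    by_cases hx : x = m
    · subst hx
      rw [PySem.List.remove?_cons_self]
      cases t with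
      | nil => simp
      | cons z t'' =>
        rw [List.dropLast_cons₂]
        rw [const_cons_dropLast x (z :: t'') (by simp) (fun y hy => hp.1 y hy rfl)]
    · have hm' : m ∈ t := by
        cases List.mem_cons.mp hm with
        | inl h => exact absurd h.symm hx
        | inr h => exact h
      rw [PySem.List.remove?_cons_of_ne _ hx, ih hm' hp.2]
      cases t with
      | nil => cases hm'
      | cons z t'' => simp [List.dropLast_cons₂]

-- the main induction: A's loop, run on the still-alive window of the sorted Ken list,
-- equals B's two-pointer loop
theorem loop_eq (k : List Int) (hk : k.Pairwise (· ≤ ·)) :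
    ∀ (n : List Int) (j m : Nat) (c : Int),
    n.Pairwise (· ≤ ·) →
    n.length ≤ m → j + m ≤ k.length →
    playUnfaithLoop n.reverse ((k.drop j).take m) c = loopB k n j c := by
  intro n
  induction n with
  | nil =>
    intro j m c _ _ _
    rw [playUnfaithLoop]
    simp [loopB]
  | cons x t ih =>
    intro j m c hpn hlen hjm
    have hj : j < k.length := by simp at hlen; omega
    cases m with
    | zero => simp at hlen
    | succ m' =>
      have hlen' : t.length ≤ m' := by simp at hlen; omega
      have hket : (k.drop j).take (m' + 1) = k[j] :: (k.drop (j + 1)).take m' := by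
        rw [List.drop_eq_getElem_cons hj, List.take_succ_cons]
      have hkenlen : ((k.drop j).take (m' + 1)).length = m' + 1 := by
        simp; omega
      have hsub : ((k.drop j).take (m' + 1)).Sublist k :=
        (List.take_sublist _ _).trans (List.drop_sublist _ _)
      have hkenp : ((k.drop j).take (m' + 1)).Pairwise (· ≤ ·) := hk.sublist hsub
      have hpt : t.Pairwise (· ≤ ·) := (List.pairwise_cons.mp hpn).2
      have hxle : ∀ y ∈ x :: t, x ≤ y := by
        intro y hy
        cases List.mem_cons.mp hy with
        | inl h => exact le_of_eq h.symm
        | inr h => exact (List.pairwise_cons.mp hpn).1 y h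
      have hnaone : (x :: t).reverse ≠ [] := by simp
      -- min of Naomi is x
      have hminN : PySem.List.min? ((x :: t).reverse) (fun y => y) = some x := by
        cases hmn : PySem.List.min? ((x :: t).reverse) (fun y => y) with
        | none => rw [PySem.List.min?_eq_none_iff] at hmn; exact absurd hmn hnaone
        | some mn =>
          have h1 : mn ∈ x :: t := List.mem_reverse.mp (PySem.List.min?_mem hmn)
          have h2 : mn ≤ x := PySem.List.min?_isMin hmn x (by simp)
          have h3 : x ≤ mn := hxle mn h1
          rw [le_antisymm h2 h3]
      -- min of the Ken window is k[j]
      have hminK : PySem.List.min? ((k.drop j).take (m' + 1)) (fun y => y) = some k[j] := by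
        cases hmk : PySem.List.min? ((k.drop j).take (m' + 1)) (fun y => y) with
        | none =>
          rw [PySem.List.min?_eq_none_iff] at hmk
          rw [hmk] at hkenlen; simp at hkenlen
        | some mk =>
          have h1 : mk ∈ (k.drop j).take (m' + 1) := PySem.List.min?_mem hmk
          have h2 : mk ≤ k[j] := PySem.List.min?_isMin hmk k[j] (by rw [hket]; simp)
          have h3 : k[j] ≤ mk := by
            rcases List.pairwise_cons.mp (hket ▸ hkenp) with ⟨hh, _⟩
            rw [hket] at h1
            cases List.mem_cons.mp h1 with
            | inl h => exact le_of_eq h.symm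
            | inr h => exact hh mk h
          rw [le_antisymm h2 h3]
      -- removing the min from Naomi (sorted descending) drops its last element
      have hremN : PySem.List.remove? ((x :: t).reverse) x = some t.reverse := by
        have : PySem.List.remove? ((x :: t).reverse) x = some ((x :: t).reverse).dropLast := by
          apply remove_suffix
          · exact List.mem_reverse.mpr (by simp)
          · rw [List.pairwise_reverse]
            apply hpn.imp_of_mem
            intro a b ha hb hab hbx
            exact le_antisymm (hbx ▸ hab) (hxle a ha)
        rw [this, List.reverse_cons, List.dropLast_concat]
      rw [playUnfaithLoop]
      rw [dif_neg hnaone]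
      rw [hminN, hminK]
      by_cases hlt : x < k[j]
      · -- Ken plays his max: the window loses its last element
        have hmaxK : ∃ mx, PySem.List.max? ((k.drop j).take (m' + 1)) (fun y => y) = some mx := by
          cases hmk : PySem.List.max? ((k.drop j).take (m' + 1)) (fun y => y) with
          | none =>
            rw [PySem.List.max?_eq_none_iff] at hmk
            rw [hmk] at hkenlen; simp at hkenlen
          | some mx => exact ⟨mx, rfl⟩
        obtain ⟨mx, hmx⟩ := hmaxK
        have hremK : PySem.List.remove? ((k.drop j).take (m' + 1)) mx
            = some ((k.drop j).take m') := by
          have hd : PySem.List.remove? ((k.drop j).take (m' + 1)) mx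
              = some ((k.drop j).take (m' + 1)).dropLast := by
            apply remove_suffix
            · exact PySem.List.max?_mem hmx
            · apply hkenp.imp_of_mem
              intro a b ha hb hab hax
              exact le_antisymm (PySem.List.max?_isMax hmx b hb) (hax ▸ hab)
          rw [hd, List.dropLast_eq_take, hkenlen]
          simp [List.take_take]
        simp only [if_pos hlt, hmx, Option.getD_some]
        split
        next nao' ken' h1 h2 =>
          rw [hremN] at h1
          rw [hremK] at h2
          injection h1 with h1
          injection h2 with h2
          subst h1; subst h2
          rw [ih j m' c hpt hlen' (by omega)]
          simp only [loopB, List.getElem?_eq_getElem hj]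
          rw [if_neg (by omega)]
        next h =>
          exact absurd (h _ _ hremN hremK) (fun f => f)
      · -- Ken plays his min k[j]: the window loses its head
        have hremK : PySem.List.remove? ((k.drop j).take (m' + 1)) k[j]
            = some ((k.drop (j + 1)).take m') := by
          rw [hket, PySem.List.remove?_cons_self]
        simp only [if_neg hlt]
        split
        next nao' ken' h1 h2 =>
          rw [hremN] at h1
          rw [hremK] at h2
          injection h1 with h1
          injection h2 with h2
          subst h1; subst h2
          rw [ih (j + 1) m' (c + 1) hpt hlen' (by omega)]
          simp only [loopB, List.getElem?_eq_getElem hj]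
          rw [if_pos (by omega)]
        next h =>
          exact absurd (h _ _ hremN hremK) (fun f => f)

-- ===== VERDICT (by name: the statement is the Claim_ definition above) =====
theorem playUnfaith_spec : Claim_equal_playUnfaith := by
  intro N K _ hpre
  unfold Spec_playUnfaith playUnfaith playUnfaith_alt
  have hk : (PySem.List.sorted K (fun y => y) false).Pairwise (· ≤ ·) :=
    PySem.List.sorted_pairwise K (fun y => y)
  have hn : (PySem.List.sorted N (fun y => y) false).Pairwise (· ≤ ·) :=
    PySem.List.sorted_pairwise N (fun y => y)
  rw [foldB]
  have h := loop_eq (PySem.List.sorted K (fun y => y) false) hk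
      (PySem.List.sorted N (fun y => y) false) 0
      (PySem.List.sorted K (fun y => y) false).length 0 hn
      (by simpa [PySem.List.length_sorted] using hpre) (by simp)
  rw [List.drop_zero, List.take_length] at h
  exact h
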